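-- pv_equiv track=rewrite | github.com/VladimirGutuev/Data-Science-For-Beginners-from-scratch-SENATOROV | python/yandex/chapter_4_1_functions_scopses_and_passing_parameters_to_the_function.py | fragments
-- ===== SOURCE A (Python) =====
-- def fragments(numbers: list[int]) -> list[list[int]]:
--     """Split a list into strictly increasing contiguous fragments."""
--     if not numbers:
--         return []
--     parts: list[list[int]] = [[numbers[0]]]
--     previous: int = numbers[0]
--     for value in numbers[1:]:
--         if value > previous:
--             parts[-1].append(value)
--         else:
--             parts.append([value])
--         previous = value
--     return parts
-- ===== SOURCE B (Python) =====
-- def fragments(numbers: list[int]) -> list[list[int]]: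
--     """Right-to-left pass: build the fragments reversed and in reverse order,
--     then undo both reversals at the end."""
--     rev: list[list[int]] = []
--     for v in reversed(numbers):
--         if rev and v < rev[-1][-1]:
--             rev[-1].append(v)
--         else:
--             rev.append([v])
--     return [list(reversed(f)) for f in reversed(rev)]
-- ===== Notes on version B (the rewrite author's own statement) =====
-- stated objective: alternative
-- what changed: B scans the list right-to-left, growing reversed fragments in reverse order and undoing both reversals at the end, instead of A's left-to-right pass that extends the last fragment in place.
import Mathlib
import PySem

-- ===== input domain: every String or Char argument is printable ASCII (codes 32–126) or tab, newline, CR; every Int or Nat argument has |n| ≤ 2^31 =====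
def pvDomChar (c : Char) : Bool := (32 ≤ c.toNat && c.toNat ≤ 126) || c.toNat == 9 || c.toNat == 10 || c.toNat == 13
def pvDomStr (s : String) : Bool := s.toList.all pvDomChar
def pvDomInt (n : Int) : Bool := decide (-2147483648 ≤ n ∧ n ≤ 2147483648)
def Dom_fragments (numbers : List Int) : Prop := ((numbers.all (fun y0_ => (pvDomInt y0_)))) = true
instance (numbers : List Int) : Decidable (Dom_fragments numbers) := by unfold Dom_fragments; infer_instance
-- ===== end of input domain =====

-- B scans the list right-to-left, growing reversed fragments in reverse order and undoing both
-- reversals at the end, instead of A's left-to-right pass extending the last fragment in place.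
-- A mutates its fragment lists in place but never the argument; equivalence is about the return value.

-- ===== PORT A =====
-- loop body of A: state is (parts, previous); 'parts[-1].append(value)' is modeled by
-- replacing the last element of parts (parts is never empty when this branch runs).
def stepA (st : List (List Int) × Int) (value : Int) : List (List Int) × Int :=
  if value > st.2 then
    (st.1.dropLast ++ [(st.1.getLast?.getD []) ++ [value]], value)
  else
    (st.1 ++ [[value]], value)

def fragments (numbers : List Int) : List (List Int) :=
  match numbers with
  | [] => []
  | x :: rest => (rest.foldl stepA ([[x]], x)).1

-- ===== PORT B =====
-- loop body of B: 'if rev and v < rev[-1][-1]' — the getLast? matches are the two guards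
-- (rev nonempty, last fragment nonempty; the latter always holds at run time).
def stepB (rev : List (List Int)) (v : Int) : List (List Int) :=
  match rev.getLast? with
  | some f =>
    match f.getLast? with
    | some w => if v < w then rev.dropLast ++ [f ++ [v]] else rev ++ [[v]]
    | none => rev ++ [[v]]
  | none => rev ++ [[v]]

def fragments_alt (numbers : List Int) : List (List Int) :=
  (((numbers.reverse).foldl stepB []).reverse).map List.reverse

-- ===== PRECONDITION & SPEC =====
def Spec_fragments (numbers : List Int) (out : List (List Int)) : Prop := out = fragments_alt numbers
instance (numbers : List Int) (out : List (List Int)) : Decidable (Spec_fragments numbers out) := by unfold Spec_fragments; infer_instance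

-- ===== CLAIM (what is proved, stated in full; the proofs are below) =====
def Claim_equal_fragments : Prop := ∀ (numbers : List Int), Dom_fragments numbers → Spec_fragments numbers (fragments numbers)

-- ===== LEMMAS AND PROOFS =====

-- canonical right fold both ports are reduced to
def push (v : Int) (r : List (List Int)) : List (List Int) :=
  match r with
  | (w :: ws) :: rest => if v < w then (v :: w :: ws) :: rest else [v] :: ((w :: ws) :: rest)
  | r => [v] :: r

def frag (l : List Int) : List (List Int) := l.foldr push []

-- the tail of A's loop, with current open fragment cur ending in prev
def Frun (cur : List Int) (prev : Int) (vs : List Int) : List (List Int) :=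
  match vs with
  | [] => [cur]
  | v :: vs => if v > prev then Frun (cur ++ [v]) v vs else cur :: Frun [v] v vs

def mergeInto (cur : List Int) (prev : Int) (r : List (List Int)) : List (List Int) :=
  match r with
  | [] => [cur]
  | (w :: ws) :: rest => if w > prev then (cur ++ (w :: ws)) :: rest else cur :: ((w :: ws) :: rest)
  | [] :: rest => cur :: ([] :: rest)

lemma foldl_stepA (vs : List Int) : ∀ (parts : List (List Int)) (cur : List Int) (prev : Int),
    (vs.foldl stepA (parts ++ [cur], prev)).1 = parts ++ Frun cur prev vs := by
  induction vs with
  | nil => intro parts cur prev; simp [Frun]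
  | cons v vs ih =>
    intro parts cur prev
    simp only [List.foldl_cons, stepA, Frun]
    by_cases h : v > prev
    · simp only [h, if_pos, List.dropLast_concat, List.getLast?_concat, Option.getD_some]
      exact ih parts (cur ++ [v]) v
    · simp only [h, if_neg, not_false_iff]
      rw [show parts ++ [cur] ++ [[v]] = (parts ++ [cur]) ++ [[v]] by simp]
      rw [ih (parts ++ [cur]) [v] v]
      simp
  
lemma Frun_eq_mergeInto (vs : List Int) : ∀ (cur : List Int) (prev : Int),
    Frun cur prev vs = mergeInto cur prev (frag vs) := by
  induction vs with
  | nil => intro cur prev; simp [Frun, frag, mergeInto]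
  | cons v vs ih =>
    intro cur prev
    have hfrag : frag (v :: vs) = push v (frag vs) := rfl
    rw [hfrag]
    simp only [Frun]
    rcases hr : frag vs with _ | ⟨f, rest⟩
    · by_cases h : v > prev
      · simp [h, ih, hr, mergeInto, push]
      · simp [h, ih, hr, mergeInto, push]
    · rcases f with _ | ⟨w, ws⟩
      · by_cases h : v > prev
        · simp [h, ih, hr, mergeInto, push]
        · simp [h, ih, hr, mergeInto, push]
      · by_cases h : v > prev
        · by_cases h2 : v < w
          · simp [h, ih, hr, mergeInto, push, h2, gt_iff_lt]
          · simp [h, ih, hr, mergeInto, push, h2, gt_iff_lt]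
        · by_cases h2 : v < w
          · simp [h, ih, hr, mergeInto, push, h2, gt_iff_lt]
          · simp [h, ih, hr, mergeInto, push, h2, gt_iff_lt]

lemma mergeInto_single (v : Int) (r : List (List Int)) : mergeInto [v] v r = push v r := by
  rcases r with _ | ⟨f, rest⟩
  · simp [mergeInto, push]
  · rcases f with _ | ⟨w, ws⟩
    · simp [mergeInto, push]
    · by_cases h : v < w <;> simp [mergeInto, push, h, gt_iff_lt]

lemma fragments_eq_frag (numbers : List Int) : fragments numbers = frag numbers := by
  rcases numbers with _ | ⟨x, rest⟩
  · simp [fragments, frag]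
  · show (rest.foldl stepA ([[x]], x)).1 = frag (x :: rest)
    rw [show ([[x]] : List (List Int)) = [] ++ [[x]] by simp]
    rw [foldl_stepA rest [] [x] x, Frun_eq_mergeInto, mergeInto_single]
    simp [frag]

lemma foldr_stepB (l : List Int) :
    l.foldr (fun v r => stepB r v) [] = ((frag l).map List.reverse).reverse := by
  induction l with
  | nil => simp [frag]
  | cons v l ih =>
    simp only [List.foldr_cons, ih]
    have hfrag : frag (v :: l) = push v (frag l) := rfl
    rw [hfrag]
    rcases hr : frag l with _ | ⟨f, rest⟩
    · simp [stepB, push]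
    · rcases f with _ | ⟨w, ws⟩
      · simp [stepB, push]
      · have hlast : ((w :: ws).reverse).getLast? = some w := by
          rw [List.getLast?_reverse]; rfl
        by_cases h : v < w
        · simp [stepB, push, h]
        · simp [stepB, push, h]

lemma fragments_alt_eq_frag (numbers : List Int) : fragments_alt numbers = frag numbers := by
  unfold fragments_alt
  rw [List.foldl_reverse, foldr_stepB]
  simp [List.map_map]

-- ===== VERDICT (by name: the statement is the Claim_ definition above) =====
theorem fragments_spec : Claim_equal_fragments := by
  intro numbers _
  show fragments numbers = fragments_alt numbers
  rw [fragments_eq_frag, fragments_alt_eq_frag]
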